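-- pv_equiv track=rewrite | github.com/mateuszkochanek/Python-Course | lista2/zad2/zad2.py | to_6_bits
-- ===== SOURCE A (Python) =====
-- def to_6_bits(string):
--     arr = 'ABCDEFGHIJKLMNOPQRSTUVWXYZabcdefghijklmnopqrstuvwxyz0123456789+/'
--     myMap = {}
--     i = 0
--     while i < 64:
--         myMap[arr[i]] = i
--         i += 1
--     bits = []
--     for char in string:
--         temp = bin(myMap[char])[2:] # odcina na 0b na początku
--         temp = '000000'[len(temp):] + temp
--         for bit in temp:
--             bits.append(bit)
--     return bits
-- ===== SOURCE B (Python) =====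
-- def to_6_bits(string):
--     arr = 'ABCDEFGHIJKLMNOPQRSTUVWXYZabcdefghijklmnopqrstuvwxyz0123456789+/'
--     bits = []
--     for char in string:
--         v = arr.index(char)
--         for k in range(5, -1, -1):
--             bits.append('1' if (v // 2 ** k) % 2 else '0')
--     return bits
-- ===== Notes on version B (the rewrite author's own statement) =====
-- stated objective: simpler
-- what changed: Replaces the hand-built char->index dict, bin() string conversion and slice-padding with a direct arr.index lookup and arithmetic extraction of the six bits ((v // 2**k) % 2 for k = 5..0), so there is no dict, no bin() and no padding step.
import Mathlib
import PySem

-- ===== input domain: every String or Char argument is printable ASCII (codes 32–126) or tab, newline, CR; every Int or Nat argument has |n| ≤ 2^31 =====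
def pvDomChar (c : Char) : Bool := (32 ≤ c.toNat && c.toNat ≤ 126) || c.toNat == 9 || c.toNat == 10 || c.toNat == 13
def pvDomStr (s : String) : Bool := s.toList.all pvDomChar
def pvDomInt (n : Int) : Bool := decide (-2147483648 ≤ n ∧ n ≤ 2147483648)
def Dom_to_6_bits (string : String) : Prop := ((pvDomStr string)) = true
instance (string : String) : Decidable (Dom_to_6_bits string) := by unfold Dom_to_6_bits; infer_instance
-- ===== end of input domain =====

-- B replaces A's dict + bin() + slice-padding with arr.index and arithmetic bit extraction (simpler decomposition, same cost).
-- On characters outside the base64 alphabet A raises KeyError (B raises ValueError); those inputs are excluded by Pre_.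

-- ===== PORT A =====
-- the base64 alphabet 'arr' (a constant, hoisted as a helper): the characters of 'ABCDEFGHIJKLMNOPQRSTUVWXYZabcdefghijklmnopqrstuvwxyz0123456789+/'
def pvArr : List Char := ['A', 'B', 'C', 'D', 'E', 'F', 'G', 'H', 'I', 'J', 'K', 'L', 'M', 'N', 'O', 'P', 'Q', 'R', 'S', 'T', 'U', 'V', 'W', 'X', 'Y', 'Z', 'a', 'b', 'c', 'd', 'e', 'f', 'g', 'h', 'i', 'j', 'k', 'l', 'm', 'n', 'o', 'p', 'q', 'r', 's', 't', 'u', 'v', 'w', 'x', 'y', 'z', '0', '1', '2', '3', '4', '5', '6', '7', '8', '9', '+', '/']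

-- bin(n)[2:] for n ≥ 0, hand-ported (exact for nonnegative n, the only values that occur: bin(0)='0b0',
-- otherwise the bits of n from the most significant down, with bitLength n digits)
def pvBin (n : Nat) : List Char :=
  if n = 0 then ['0']
  else (List.range (PySem.Int.bitLength (n : Int))).reverse.map
    (fun k => if n / 2 ^ k % 2 = 1 then '1' else '0')

-- while i < 64: myMap[arr[i]] = i; i += 1   (arr[i] is in range for 0 ≤ i < 64, so pyGetD is exact here)
def pvMyMap : PySem.Dict Char Int :=
  (PySem.List.pyRange 0 64 1).foldl
    (fun d i => d.insert (PySem.List.pyGetD pvArr i ' ') i) PySem.Dict.empty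

-- body of A's outer for-loop; myMap[char]: KeyError (none) is excluded by Pre_, so getD is exact there
def pvStepA (bits : List String) (char : Char) : List String :=
  let temp := pvBin ((pvMyMap.get? char).getD 0).toNat
  let temp := PySem.List.slice "000000".toList (some (temp.length : Int)) none ++ temp
  temp.foldl (fun bs bit => bs ++ [String.ofList [bit]]) bits

def to_6_bits (string : String) : List String :=
  string.toList.foldl pvStepA []

-- ===== PORT B =====
-- body of B's outer for-loop; arr.index(char): ValueError (none) is excluded by Pre_, so getD is exact there;
-- k.toNat is exact since k ∈ range(5,-1,-1) is nonnegative
def pvStepB (bits : List String) (char : Char) : List String :=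
  let v : Int := ((PySem.List.index? pvArr char).getD 0 : Nat)
  (PySem.List.pyRange 5 (-1) (-1)).foldl
    (fun bs k =>
      bs ++ [if PySem.Int.mod (PySem.Int.floordiv v (2 ^ k.toNat)) 2 ≠ 0 then "1" else "0"]) bits

def to_6_bits_alt (string : String) : List String :=
  string.toList.foldl pvStepB []

-- ===== PRECONDITION & SPEC =====
-- Pre_ admits exactly the strings whose characters all lie in the base64 alphabet; on any other
-- character A raises KeyError (and B ValueError), so those inputs are excluded.
def Pre_to_6_bits (string : String) : Prop := string.toList.all (fun c => pvArr.contains c) = true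
instance (string : String) : Decidable (Pre_to_6_bits string) := by unfold Pre_to_6_bits; infer_instance

def pvWitness_to_6_bits : String := "Ab9+"

def Spec_to_6_bits (string : String) (out : List String) : Prop := out = to_6_bits_alt string
instance (string : String) (out : List String) : Decidable (Spec_to_6_bits string out) := by unfold Spec_to_6_bits; infer_instance

-- ===== CLAIM (what is proved, stated in full; the proofs are below) =====
def Claim_equal_to_6_bits : Prop := ∀ (string : String), Dom_to_6_bits string → Pre_to_6_bits string → Spec_to_6_bits string (to_6_bits string)

-- ===== LEMMAS AND PROOFS =====

lemma pvStepA_append (bits : List String) (c : Char) :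
    pvStepA bits c = bits ++ pvStepA [] c := by
  simp only [pvStepA, PySem.List.foldl_append_singleton_eq_map, List.nil_append]

lemma pvStepB_append (bits : List String) (c : Char) :
    pvStepB bits c = bits ++ pvStepB [] c := by
  simp only [pvStepB, PySem.List.foldl_append_singleton_eq_map, List.nil_append]

set_option maxRecDepth 8000 in
lemma pvMyMap_eq : pvMyMap = PySem.Dict.mk [('A', 0), ('B', 1), ('C', 2), ('D', 3), ('E', 4), ('F', 5), ('G', 6), ('H', 7), ('I', 8), ('J', 9), ('K', 10), ('L', 11), ('M', 12), ('N', 13), ('O', 14), ('P', 15), ('Q', 16), ('R', 17), ('S', 18), ('T', 19), ('U', 20), ('V', 21), ('W', 22), ('X', 23), ('Y', 24), ('Z', 25), ('a', 26), ('b', 27), ('c', 28), ('d', 29), ('e', 30), ('f', 31), ('g', 32), ('h', 33), ('i', 34), ('j', 35), ('k', 36), ('l', 37), ('m', 38), ('n', 39), ('o', 40), ('p', 41), ('q', 42), ('r', 43), ('s', 44), ('t', 45), ('u', 46), ('v', 47), ('w', 48), ('x', 49), ('y', 50), ('z', 51), ('0', 52), ('1', 53), ('2', 54), ('3', 55), ('4',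 56), ('5', 57), ('6', 58), ('7', 59), ('8', 60), ('9', 61), ('+', 62), ('/', 63)] := by decide

lemma pvStep_agree : ∀ c ∈ pvArr, pvStepA [] c = pvStepB [] c := by
  intro c hc
  simp only [pvArr] at hc
  fin_cases hc <;> (simp only [pvStepA, pvStepB, pvMyMap_eq]; decide)

theorem to_6_bits_spec : Claim_equal_to_6_bits := by
  intro s _ hpre
  simp only [Pre_to_6_bits, List.all_eq_true, List.contains_iff_mem] at hpre
  unfold Spec_to_6_bits to_6_bits to_6_bits_alt
  exact PySem.List.foldl_congr_mem' s.toList pvStepA pvStepB []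
    (fun c hc acc => by
      rw [pvStepA_append, pvStepB_append, pvStep_agree c (hpre c hc)])
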